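/-
  jsmn_d.bin, `jsmn_parse`: the three cases of the switch that CALL another function, together, with the axioms they rest on.
-/
import Prog.Jsmn.D.ParseOpen
import Prog.Jsmn.D.ParseStr
import Prog.Jsmn.D.ParsePrim

open X86.User (CodeAt RegsKept Span FlagsOK Layout toNat_add_ofNat toNat_ofNat_lt' add_ofNat_add)

open X86 J6 D
#print axioms open_spec
#print axioms string_spec
#print axioms primitive_spec
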